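-- pv_equiv track=rewrite | github.com/annettetrann/slohackslite | formatWgetMainStage2.py | format_host
-- ===== SOURCE A (Python) =====
-- def check_host_valid(host):
--     for i in range(len(host)):
--         if host[i: i +4 ] == 'www.':
--             return True
--     return False
--
-- def format_host(host):
--     if not check_host_valid(host):
--         return None
--     formattedHost = ''
--     for i in range(len(host)):
--         if host[i:i+4] == 'www.':
--             formattedHost += host[i:i+4]
--             i += 4
--             while (i != len(host)) and (host[i] != '/'):
--                 formattedHost += host[i]
--                 i += 1
--     return formattedHost
-- ===== SOURCE B (Python) =====
-- def format_host(host):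
--     idx = [i for i in range(len(host)) if host[i:i+4] == 'www.']
--     if not idx:
--         return None
--     parts = []
--     for i in idx:
--         end = host.find('/', i + 4)
--         if end == -1:
--             end = len(host)
--         parts.append(host[i:end])
--     return ''.join(parts)
-- ===== Notes on version B (the rewrite author's own statement) =====
-- stated objective: simpler
-- what changed: B collects all match start indices in one comprehension and, for each, slices up to the next separator located with str.find, joining the slices at the end; A runs a separate validity scan and then copies characters one by one in a nested while loop.
import Mathlib
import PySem

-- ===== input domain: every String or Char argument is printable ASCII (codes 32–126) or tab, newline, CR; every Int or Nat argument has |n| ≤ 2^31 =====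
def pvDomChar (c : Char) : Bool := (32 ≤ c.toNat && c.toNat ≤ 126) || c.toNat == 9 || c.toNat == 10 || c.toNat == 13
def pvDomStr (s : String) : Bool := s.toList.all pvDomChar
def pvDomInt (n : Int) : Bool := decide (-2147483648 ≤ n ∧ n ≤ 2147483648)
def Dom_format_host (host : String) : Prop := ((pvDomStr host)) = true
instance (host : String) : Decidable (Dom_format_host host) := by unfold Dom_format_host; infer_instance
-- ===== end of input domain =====

-- B replaces A's validity scan plus per-character inner while loop by one index
-- comprehension and find-based slices joined at the end (objective: simpler).

-- ===== PORT A =====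
-- check_host_valid: early-return for loop = List.any over the index range
def pvCheckHostValid (cs : List Char) : Bool :=
  (List.range cs.length).any fun (i : Nat) =>
    PySem.List.slice cs (some (i : Int)) (some ((i : Int) + 4)) = "www.".toList

-- the inner 'while (i != len(host)) and (host[i] != '/')' loop; Python only ever
-- runs it with j ≤ len, so the guard 'j ≠ len' is written 'j < len' (exact there)
def pvCopyWhile (cs : List Char) (j : Nat) (acc : List Char) : List Char :=
  if h : j < cs.length then
    if cs[j] ≠ '/' then pvCopyWhile cs (j + 1) (acc ++ [cs[j]]) else acc
  else acc
termination_by cs.length - j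

def format_host (host : String) : Option String :=
  let cs := host.toList
  if pvCheckHostValid cs = false then none
  else some (String.ofList ((List.range cs.length).foldl (fun (acc : List Char) (i : Nat) =>
    if PySem.List.slice cs (some (i : Int)) (some ((i : Int) + 4)) = "www.".toList then
      pvCopyWhile cs (i + 4) (acc ++ PySem.List.slice cs (some (i : Int)) (some ((i : Int) + 4)))
    else acc) []))

-- ===== PORT B =====
def format_host_alt (host : String) : Option String :=
  let cs := host.toList
  let idx := (List.range cs.length).filter fun (i : Nat) =>
    PySem.List.slice cs (some (i : Int)) (some ((i : Int) + 4)) = "www.".toList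
  if idx.isEmpty then none
  else some (String.ofList ((idx.map fun (i : Nat) =>
    let e := PySem.Chars.findFrom cs ['/'] ((i : Int) + 4) none
    let e := if e = -1 then (cs.length : Int) else e
    PySem.List.slice cs (some (i : Int)) (some e)).flatten))

-- ===== PRECONDITION & SPEC =====
def Spec_format_host (host : String) (out : Option String) : Prop := out = format_host_alt host
instance (host : String) (out : Option String) : Decidable (Spec_format_host host out) := by unfold Spec_format_host; infer_instance

-- ===== CLAIM (what is proved, stated in full; the proofs are below) =====
def Claim_equal_format_host : Prop := ∀ (host : String), Dom_format_host host → Spec_format_host host (format_host host)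

-- ===== LEMMAS AND PROOFS =====

theorem pvCopyWhile_append (cs : List Char) (j : Nat) (acc : List Char) :
    pvCopyWhile cs j acc = acc ++ pvCopyWhile cs j [] := by
  induction hn : cs.length - j generalizing j acc with
  | zero =>
    rw [pvCopyWhile, pvCopyWhile]
    split
    · omega
    · simp
  | succ n ih =>
    rw [pvCopyWhile, pvCopyWhile]
    split
    · split
      · rw [ih (j + 1) (acc ++ [_]) (by omega), ih (j + 1) ([] ++ [_]) (by omega)]
        simp
      · simp
    · simp

theorem pvCopyWhile_eq_takeWhile (cs : List Char) (j : Nat) :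
    pvCopyWhile cs j [] = (cs.drop j).takeWhile (fun c => c != '/') := by
  induction hn : cs.length - j generalizing j with
  | zero =>
    rw [pvCopyWhile]
    split
    · omega
    · rw [List.drop_of_length_le (by omega)]; simp
  | succ n ih =>
    rw [pvCopyWhile]
    split
    · next h =>
      rw [List.drop_eq_getElem_cons h, List.takeWhile_cons]
      split
      · rw [pvCopyWhile_append, ih (j + 1) (by omega)]
        simp_all
      · simp_all
    · omega

theorem flatMap_ite (l : List Nat) (p : Nat → Prop) [DecidablePred p] (G : Nat → List Char) :
    l.flatMap (fun x => if p x then G x else []) = ((l.filter (fun x => decide (p x))).map G).flatten := by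
  induction l with
  | nil => simp
  | cons a l ih =>
    by_cases h : p a <;> simp [h, ih]

-- takeWhile of 'not slash' is the take up to the first slash
theorem takeWhile_eq_take_of_first (d : List Char) (n : Nat) (hn : n ≤ d.length)
    (hbefore : ∀ m, (hm : m < n) → d[m]'(by omega) ≠ '/')
    (hat : ∀ (h : n < d.length), d[n] = '/') :
    d.takeWhile (fun c => c != '/') = d.take n := by
  induction d generalizing n with
  | nil => simp
  | cons a d ih =>
    cases n with
    | zero =>
      have := hat (by simp)
      simp_all
    | succ n =>
      have ha : a ≠ '/' := hbefore 0 (by omega)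
      simp only [List.takeWhile_cons, List.take_succ_cons]
      rw [if_pos (by simpa using ha)]
      congr 1
      exact ih n (by simpa using hn)
        (fun m hm => hbefore (m + 1) (by omega))
        (fun h => hat (by simpa using h))

-- the per-index payloads of A and B agree on each matching index
theorem payload_eq (cs : List Char) (i : Nat)
    (hp : PySem.List.slice cs (some (i : Int)) (some ((i : Int) + 4)) = "www.".toList) :
    (let e := PySem.Chars.findFrom cs ['/'] ((i : Int) + 4) none
     let e := if e = -1 then (cs.length : Int) else e
     PySem.List.slice cs (some (i : Int)) (some e))
    = PySem.List.slice cs (some (i : Int)) (some ((i : Int) + 4))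
      ++ (cs.drop (i + 4)).takeWhile (fun c => c != '/') := by
  have hcast : ((i : Int) + 4) = ((i + 4 : Nat) : Int) := by push_cast; ring
  rw [hcast] at hp ⊢
  rw [PySem.List.slice_natCast] at hp
  simp only [Nat.add_sub_cancel_left] at hp
  have h4 : i + 4 ≤ cs.length := by
    have := congrArg List.length hp
    simp at this
    omega
  rw [PySem.Chars.findFrom_natCast cs ['/'] (i + 4) h4]
  set d := cs.drop (i + 4) with hd
  have hdlen : d.length = cs.length - (i + 4) := by simp [hd]
  have hdi : cs.drop i = (cs.drop i).take 4 ++ d := by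
    rw [hd, ← List.drop_drop]
    exact (List.take_append_drop 4 (cs.drop i)).symm
  by_cases hfind : PySem.Chars.find d ['/'] = -1
  · -- no '/' at or after i+4: both sides are host[i:]
    rw [hfind]
    simp only [reduceIte]
    have hmem : '/' ∉ d := fun hm =>
      (PySem.Chars.find_eq_neg_one_iff (s := d) (sub := ['/'])).mp hfind
        ((List.singleton_infix_iff _ _).mpr hm)
    have htw : d.takeWhile (fun c => c != '/') = d :=
      List.takeWhile_eq_self_iff.mpr (fun x hx => by
        simp only [bne_iff_ne, ne_eq]
        exact fun hxe => hmem (hxe ▸ hx))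
    rw [PySem.List.slice_natCast, PySem.List.slice_natCast, htw]
    simp only [Nat.add_sub_cancel_left]
    rw [← hdi, List.take_of_length_le (by simp)]
  · -- the first '/' at or after i+4 sits at index (i+4)+f
    have hge : 0 ≤ PySem.Chars.find d ['/'] := by
      have := PySem.Chars.neg_one_le_find (s := d) (sub := ['/'])
      omega
    set f := PySem.Chars.find d ['/'] with hf
    have hspec := PySem.Chars.find_spec (s := d) (sub := ['/']) hge
    have hflen : f ≤ d.length := PySem.Chars.find_le_length (s := d) (sub := ['/'])
    have hlt : f.toNat < d.length := by
      rcases hspec.1 with ⟨t, ht⟩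
      have : (d.drop f.toNat).length ≠ 0 := by rw [← ht]; simp
      simp at this
      omega
    rw [if_neg hfind]
    have hnv : (if ((i + 4 : Nat) : Int) + f = -1 then (cs.length : Int)
        else ((i + 4 : Nat) : Int) + f) = ((i + 4 : Nat) : Int) + f := if_neg (by omega)
    simp only [hnv]
    have hcast2 : ((i + 4 : Nat) : Int) + f = ((i + 4 + f.toNat : Nat) : Int) := by
      push_cast [Int.toNat_of_nonneg hge]; ring
    rw [hcast2, PySem.List.slice_natCast, PySem.List.slice_natCast]
    simp only [Nat.add_sub_cancel_left]
    have htw : d.takeWhile (fun c => c != '/') = d.take f.toNat := by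
      apply takeWhile_eq_take_of_first d f.toNat (by omega)
      · intro m hm hme
        apply hspec.2 m hm
        rw [List.drop_eq_getElem_cons (by omega), hme]
        exact ⟨_, rfl⟩
      · intro h
        have := hspec.1
        rw [List.drop_eq_getElem_cons hlt] at this
        exact ((List.cons_prefix_cons.mp this).1).symm
    rw [htw]
    have : i + 4 + f.toNat - i = 4 + f.toNat := by omega
    rw [this, List.take_add, List.drop_drop]

theorem format_host_main (host : String) : format_host host = format_host_alt host := by
  unfold format_host format_host_alt
  set cs := host.toList with hcs
  have hcond : (pvCheckHostValid cs = false)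
      ↔ ((List.range cs.length).filter fun (i : Nat) =>
          PySem.List.slice cs (some (i : Int)) (some ((i : Int) + 4)) = "www.".toList).isEmpty = true := by
    rw [pvCheckHostValid, List.any_eq_false, List.isEmpty_iff, List.filter_eq_nil_iff]
  by_cases hc : pvCheckHostValid cs = false
  · rw [if_pos hc, if_pos (hcond.mp hc)]
  · rw [if_neg hc, if_neg (by rw [← hcond]; exact hc)]
    congr 1
    congr 1
    -- rewrite A's fold body into 'append a per-index payload'
    have hbody : (fun (acc : List Char) (i : Nat) =>
        if PySem.List.slice cs (some (i : Int)) (some ((i : Int) + 4)) = "www.".toList then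
          pvCopyWhile cs (i + 4) (acc ++ PySem.List.slice cs (some (i : Int)) (some ((i : Int) + 4)))
        else acc)
        = (fun (acc : List Char) (i : Nat) => acc ++
            (if PySem.List.slice cs (some (i : Int)) (some ((i : Int) + 4)) = "www.".toList then
              PySem.List.slice cs (some (i : Int)) (some ((i : Int) + 4))
                ++ (cs.drop (i + 4)).takeWhile (fun c => c != '/')
            else [])) := by
      funext acc i
      split
      · rw [pvCopyWhile_append, pvCopyWhile_eq_takeWhile, List.append_assoc]
      · simp
    rw [hbody, PySem.List.foldl_append_eq_flatMap, List.nil_append, flatMap_ite]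
    congr 1
    apply List.map_congr_left
    intro i hi
    have hp := (List.mem_filter.mp hi).2
    simp only [decide_eq_true_eq] at hp
    exact (payload_eq cs i hp).symm

-- ===== VERDICT (by name: the statement is the Claim_ definition above) =====
theorem format_host_spec : Claim_equal_format_host := by
  intro host _
  unfold Spec_format_host
  exact format_host_main host
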